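-- pv_equiv track=rewrite | github.com/KanadianKaleb/AirFuel_Studios | tuner_dashboard_Version21.py | detect_header_candidates
-- ===== SOURCE A (Python) =====
-- def detect_header_candidates(raw: str, max_lines=30):
--     """
--     Return list of (line_index, line_text) candidates for header rows.
--     Exclude pure numeric channel-id lines if possible.
--     """
--     lines = raw.splitlines()
--     candidates = []
--     for i in range(min(len(lines), max_lines)):
--         ln = lines[i].rstrip("\n")
--         s = ln.strip()
--         if not s:
--             continue
--         # heuristics:
--         # - prefer lines with alphabetic characters (column names)
--         # - or lines starting with "Offset" or containing "Engine RPM"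
--         has_alpha = any(ch.isalpha() for ch in s)
--         if has_alpha or s.lower().startswith("offset") or "engine rpm" in s.lower():
--             candidates.append((i, ln))
--     # fallback: include lines with many delimiters (may be header)
--     if not candidates:
--         for i in range(min(len(lines), max_lines)):
--             ln = lines[i].rstrip("\n")
--             if ln.count(",") >= 3 or ln.count(";") >= 3 or ln.count("\t") >= 3:
--                 candidates.append((i, ln))
--     # always include first non-empty line as last resort
--     if not candidates:
--         for i in range(min(len(lines), max_lines)):
--             if lines[i].strip():
--                 candidates.append((i, lines[i]))
--                 break
--     return candidates
-- ===== SOURCE B (Python) =====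
-- def detect_header_candidates(raw: str, max_lines=30):
--     """Single pass: collect primary and delimiter candidates and the first
--     non-empty line simultaneously, then pick the strongest non-empty tier."""
--     lines = raw.splitlines()
--     primary = []
--     delim = []
--     first = None
--     for i in range(min(len(lines), max_lines)):
--         ln = lines[i].rstrip("\n")
--         s = ln.strip()
--         if s and (any(ch.isalpha() for ch in s)
--                   or s.lower().startswith("offset")
--                   or "engine rpm" in s.lower()):
--             primary.append((i, ln))
--         if ln.count(",") >= 3 or ln.count(";") >= 3 or ln.count("\t") >= 3:
--             delim.append((i, ln))
--         if first is None and lines[i].strip():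
--             first = (i, lines[i])
--     if primary:
--         return primary
--     if delim:
--         return delim
--     return [first] if first is not None else []
-- ===== Notes on version B (the rewrite author's own statement) =====
-- stated objective: alternative
-- what changed: A makes up to three separate gated scans over the line prefix (primary heuristics, then delimiter counts, then first non-empty line); B makes a single pass that builds all three candidate tiers at once and selects the first non-empty tier afterwards.
import Mathlib
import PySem

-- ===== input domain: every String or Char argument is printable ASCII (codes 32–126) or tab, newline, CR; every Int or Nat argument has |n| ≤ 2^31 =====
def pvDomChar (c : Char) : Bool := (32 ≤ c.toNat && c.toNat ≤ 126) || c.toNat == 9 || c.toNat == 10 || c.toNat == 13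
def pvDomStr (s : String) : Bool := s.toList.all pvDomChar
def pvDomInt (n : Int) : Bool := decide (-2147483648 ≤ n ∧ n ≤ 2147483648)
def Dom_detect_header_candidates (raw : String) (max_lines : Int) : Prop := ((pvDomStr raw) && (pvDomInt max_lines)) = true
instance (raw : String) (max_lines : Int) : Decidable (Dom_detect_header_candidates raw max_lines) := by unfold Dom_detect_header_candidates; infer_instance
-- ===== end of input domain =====

-- B replaces A's up-to-three gated scans over the line prefix by ONE pass that builds all
-- three candidate tiers simultaneously and then picks the first non-empty tier (objective: alternative).

-- exact hand port of str.rstrip("\n"): drop trailing '\n' characters (used by both ports)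
def pvRstripNL (s : String) : String :=
  String.ofList ((s.toList.reverse.dropWhile (fun c => c == '\n')).reverse)

-- the primary heuristic of A's first loop: stripped line non-empty and (has alpha / starts with "offset" / contains "engine rpm")
def pvPrimaryCond (ln : String) : Bool :=
  let s := PySem.Str.strip ln
  !s.toList.isEmpty &&
    (s.toList.any PySem.Chars.isalpha
      || PySem.Str.startswith (PySem.Str.lower s) "offset"
      || PySem.Str.isIn "engine rpm" (PySem.Str.lower s))

-- the delimiter heuristic of A's fallback loop
def pvDelimCond (ln : String) : Bool :=
  decide (3 ≤ PySem.Str.count ln ",") || decide (3 ≤ PySem.Str.count ln ";")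
    || decide (3 ≤ PySem.Str.count ln "\t")

-- ===== PORT A =====
def pvLoop1 (lines : List String) (idxs : List Int) (acc : List (Int × String)) : List (Int × String) :=
  match idxs with
  | [] => acc
  | i :: rest =>
    let ln := pvRstripNL (PySem.List.pyGetD lines i "")
    pvLoop1 lines rest (if pvPrimaryCond ln then acc ++ [(i, ln)] else acc)

def pvLoop2 (lines : List String) (idxs : List Int) (acc : List (Int × String)) : List (Int × String) :=
  match idxs with
  | [] => acc
  | i :: rest =>
    let ln := pvRstripNL (PySem.List.pyGetD lines i "")
    pvLoop2 lines rest (if pvDelimCond ln then acc ++ [(i, ln)] else acc)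

-- A's last-resort loop with break: first i whose line strips non-empty
def pvLoop3 (lines : List String) : List Int → Option (Int × String)
  | [] => none
  | i :: rest =>
    if (PySem.Str.strip (PySem.List.pyGetD lines i "")).toList.isEmpty then pvLoop3 lines rest
    else some (i, PySem.List.pyGetD lines i "")

def detect_header_candidates (raw : String) (max_lines : Int) : List (Int × String) :=
  let lines := PySem.Str.splitlines raw
  let idxs := PySem.List.pyRange 0 (min (lines.length : Int) max_lines) 1
  let c1 := pvLoop1 lines idxs []
  let c2 := if c1.isEmpty then pvLoop2 lines idxs [] else c1
  if c2.isEmpty then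
    match pvLoop3 lines idxs with
    | some p => [p]
    | none => []
  else c2

-- ===== PORT B =====
-- one fold maintaining (primary, delim, first non-empty line)
def pvScan (lines : List String) (idxs : List Int)
    (st : List (Int × String) × List (Int × String) × Option (Int × String)) :
    List (Int × String) × List (Int × String) × Option (Int × String) :=
  match idxs with
  | [] => st
  | i :: rest =>
    let ln := pvRstripNL (PySem.List.pyGetD lines i "")
    pvScan lines rest
      ((if pvPrimaryCond ln then st.1 ++ [(i, ln)] else st.1),
       (if pvDelimCond ln then st.2.1 ++ [(i, ln)] else st.2.1),
       (match st.2.2 with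
        | some p => some p
        | none =>
          if (PySem.Str.strip (PySem.List.pyGetD lines i "")).toList.isEmpty then none
          else some (i, PySem.List.pyGetD lines i "")))

def detect_header_candidates_alt (raw : String) (max_lines : Int) : List (Int × String) :=
  let lines := PySem.Str.splitlines raw
  let idxs := PySem.List.pyRange 0 (min (lines.length : Int) max_lines) 1
  match pvScan lines idxs ([], [], none) with
  | (primary, delim, first) =>
    if !primary.isEmpty then primary
    else if !delim.isEmpty then delim
    else match first with
      | some p => [p]
      | none => []

-- ===== PRECONDITION & SPEC =====
def Spec_detect_header_candidates (raw : String) (max_lines : Int) (out : List (Int × String)) : Prop := out = detect_header_candidates_alt raw max_lines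
instance (raw : String) (max_lines : Int) (out : List (Int × String)) : Decidable (Spec_detect_header_candidates raw max_lines out) := by unfold Spec_detect_header_candidates; infer_instance

-- ===== CLAIM (what is proved, stated in full; the proofs are below) =====
def Claim_equal_detect_header_candidates : Prop := ∀ (raw : String) (max_lines : Int), Dom_detect_header_candidates raw max_lines → Spec_detect_header_candidates raw max_lines (detect_header_candidates raw max_lines)

-- ===== LEMMAS AND PROOFS =====

-- B's single scan computes exactly the results of A's three loops


theorem pvScan_eq (lines : List String) (idxs : List Int)
    (p d : List (Int × String)) (f : Option (Int × String)) :
    pvScan lines idxs (p, d, f) =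
      (pvLoop1 lines idxs p, pvLoop2 lines idxs d,
        match f with
        | some x => some x
        | none => pvLoop3 lines idxs) := by
  induction idxs generalizing p d f with
  | nil => cases f <;> rfl
  | cons i rest ih =>
    cases f with
    | some x =>
      simp only [pvScan, pvLoop1, pvLoop2]
      exact ih _ _ _
    | none =>
      simp only [pvScan, pvLoop1, pvLoop2, pvLoop3]
      by_cases h : (PySem.Str.strip (PySem.List.pyGetD lines i "")).toList.isEmpty = true
      · simp only [h, if_true]
        exact ih _ _ _
      · simp only [h]
        exact ih _ _ _

-- the tier selection of B equals A's chained fallbacks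
theorem pvSelect_eq (c1 c2 : List (Int × String)) (f : Option (Int × String)) :
    (if (if c1.isEmpty then c2 else c1).isEmpty then
        (match f with | some p => [p] | none => ([] : List (Int × String)))
      else (if c1.isEmpty then c2 else c1))
    = (if !c1.isEmpty then c1
       else if !c2.isEmpty then c2
       else match f with | some p => [p] | none => []) := by
  cases c1 <;> cases c2 <;> simp

theorem detect_header_candidates_eq (raw : String) (max_lines : Int) :
    detect_header_candidates raw max_lines = detect_header_candidates_alt raw max_lines := by
  simp only [detect_header_candidates, detect_header_candidates_alt, pvScan_eq]
  exact pvSelect_eq _ _ _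

-- ===== VERDICT (by name: the statement is the Claim_ definition above) =====
theorem detect_header_candidates_spec : Claim_equal_detect_header_candidates := by
  intro raw max_lines _
  unfold Spec_detect_header_candidates
  exact detect_header_candidates_eq raw max_lines
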